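-- pv_equiv track=rewrite | github.com/noah-johny/sde-sheet-coding | swap_pairs_equal_sum.py | findSwapValues
-- ===== SOURCE A (Python) =====
-- def findSwapValues(a, n, b, m):
--     if n < 1 or m < 1:
--         return -1
--
--     sum_a = sum(a)
--     sum_b = sum(b)
--     b = set(b)
--
--     diff = sum_a - sum_b
--
--     if diff % 2 != 0:
--         return -1
--
--     diff = diff // 2
--
--     for num in a:
--         if num - diff in b:
--             return 1
--
--     return -1
-- ===== SOURCE B (Python) =====
-- def findSwapValues(a, n, b, m):
--     if n < 1 or m < 1:
--         return -1
--
--     diff = sum(a) - sum(b)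
--     if diff % 2 != 0:
--         return -1
--     diff //= 2
--
--     sa = sorted(a)
--     sb = sorted(b)
--     i = j = 0
--     while i < len(sa) and j < len(sb):
--         d = sa[i] - sb[j]
--         if d == diff:
--             return 1
--         if d < diff:
--             i += 1
--         else:
--             j += 1
--     return -1
-- ===== Notes on version B (the rewrite author's own statement) =====
-- stated objective: alternative
-- what changed: Replaces the hash-set membership scan with a sort-then-two-pointer sweep over sorted copies of both lists, so no set is built and the pair is found by a single merge-like pass.
import Mathlib
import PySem

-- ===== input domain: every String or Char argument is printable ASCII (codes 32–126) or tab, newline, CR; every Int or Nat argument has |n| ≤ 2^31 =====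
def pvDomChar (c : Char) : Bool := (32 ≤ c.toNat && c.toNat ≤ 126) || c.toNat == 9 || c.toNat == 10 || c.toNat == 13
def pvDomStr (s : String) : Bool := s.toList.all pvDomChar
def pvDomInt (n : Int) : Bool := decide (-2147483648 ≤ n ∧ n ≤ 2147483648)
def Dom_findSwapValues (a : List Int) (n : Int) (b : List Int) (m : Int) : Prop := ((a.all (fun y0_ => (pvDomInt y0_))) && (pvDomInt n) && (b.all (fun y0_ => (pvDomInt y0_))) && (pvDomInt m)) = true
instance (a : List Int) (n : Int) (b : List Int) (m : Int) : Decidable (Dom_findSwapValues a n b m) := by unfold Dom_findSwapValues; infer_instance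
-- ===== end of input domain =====

-- B replaces A's hash-set membership scan by a sort-then-two-pointer sweep (alternative algorithm, same results).

-- ===== PORT A =====
-- the 'for num in a: if num - diff in b: return 1' loop
def pvScanA (l : List Int) (bs : PySem.Set Int) (d : Int) : Int :=
  match l with
  | [] => -1
  | num :: rest => if PySem.Set.contains bs (num - d) then 1 else pvScanA rest bs d

def findSwapValues (a : List Int) (n : Int) (b : List Int) (m : Int) : Int :=
  if n < 1 ∨ m < 1 then -1
  else
    let sum_a := a.sum
    let sum_b := b.sum
    let bset := PySem.Set.ofList b
    let diff := sum_a - sum_b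
    if PySem.Int.mod diff 2 ≠ 0 then -1
    else pvScanA a bset (PySem.Int.floordiv diff 2)

-- ===== PORT B =====
-- the two-pointer while loop over the sorted copies (advancing i = dropping the head of xs, etc.)
def pvTwoPtr (xs ys : List Int) (d : Int) : Int :=
  match xs, ys with
  | x :: xs', y :: ys' =>
      if x - y = d then 1
      else if x - y < d then pvTwoPtr xs' (y :: ys') d
      else pvTwoPtr (x :: xs') ys' d
  | _, _ => -1
termination_by xs.length + ys.length
decreasing_by all_goals (simp; try omega)

def findSwapValues_alt (a : List Int) (n : Int) (b : List Int) (m : Int) : Int :=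
  if n < 1 ∨ m < 1 then -1
  else
    let diff := a.sum - b.sum
    if PySem.Int.mod diff 2 ≠ 0 then -1
    else
      let d := PySem.Int.floordiv diff 2
      pvTwoPtr (PySem.List.sorted a (fun x => x) false) (PySem.List.sorted b (fun x => x) false) d

-- ===== PRECONDITION & SPEC =====
def Spec_findSwapValues (a : List Int) (n : Int) (b : List Int) (m : Int) (out : Int) : Prop := out = findSwapValues_alt a n b m
instance (a : List Int) (n : Int) (b : List Int) (m : Int) (out : Int) : Decidable (Spec_findSwapValues a n b m out) := by unfold Spec_findSwapValues; infer_instance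

-- ===== CLAIM (what is proved, stated in full; the proofs are below) =====
def Claim_equal_findSwapValues : Prop := ∀ (a : List Int) (n : Int) (b : List Int) (m : Int), Dom_findSwapValues a n b m → Spec_findSwapValues a n b m (findSwapValues a n b m)

-- ===== LEMMAS AND PROOFS =====

theorem pvScanA_spec (l : List Int) (bs : PySem.Set Int) (d : Int) :
    pvScanA l bs d = if ∃ x ∈ l, (x - d) ∈ bs then 1 else -1 := by
  induction l with
  | nil => simp [pvScanA]
  | cons x rest ih =>
      simp only [pvScanA, ih, List.mem_cons]
      by_cases h : (x - d) ∈ bs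
      · simp [PySem.Set.contains, h]
      · simp [PySem.Set.contains, h]

theorem pvTwoPtr_spec (xs ys : List Int) (d : Int)
    (hx : xs.Pairwise (· ≤ ·)) (hy : ys.Pairwise (· ≤ ·)) :
    pvTwoPtr xs ys d = if ∃ x ∈ xs, ∃ y ∈ ys, x - y = d then 1 else -1 := by
  fun_induction pvTwoPtr xs ys d with
  | case1 x xs' y ys' heq =>
      rw [if_pos ⟨x, List.mem_cons_self, y, List.mem_cons_self, heq⟩]
  | case2 x xs' y ys' hne hlt ih =>
      rw [ih (List.Pairwise.of_cons hx) hy]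
      congr 1
      apply propext
      constructor
      · rintro ⟨z, hz, w, hw, hzw⟩; exact ⟨z, List.mem_cons_of_mem _ hz, w, hw, hzw⟩
      · rintro ⟨z, hz, w, hw, hzw⟩
        rcases List.mem_cons.mp hz with rfl | hz'
        · -- z = x : impossible, x - w ≤ x - y < d for every w in y :: ys'
          exfalso
          rcases List.mem_cons.mp hw with rfl | hw'
          · exact hne hzw
          · have : y ≤ w := List.rel_of_pairwise_cons hy hw'
            omega
        · exact ⟨z, hz', w, hw, hzw⟩
  | case3 x xs' y ys' hne hge ih =>
      rw [ih hx (List.Pairwise.of_cons hy)]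
      congr 1
      apply propext
      constructor
      · rintro ⟨z, hz, w, hw, hzw⟩; exact ⟨z, hz, w, List.mem_cons_of_mem _ hw, hzw⟩
      · rintro ⟨z, hz, w, hw, hzw⟩
        rcases List.mem_cons.mp hw with rfl | hw'
        · exfalso
          rcases List.mem_cons.mp hz with rfl | hz'
          · exact hne hzw
          · have : x ≤ z := List.rel_of_pairwise_cons hx hz'
            omega
        · exact ⟨z, hz, w, hw', hzw⟩
  | case4 xs ys h =>
      rw [if_neg]
      rintro ⟨z, hz, w, hw, -⟩
      cases xs with
      | nil => exact absurd hz (List.not_mem_nil)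
      | cons x xs' =>
        cases ys with
        | nil => exact absurd hw (List.not_mem_nil)
        | cons y ys' => exact h x xs' y ys' rfl rfl

-- ===== VERDICT (by name: the statement is the Claim_ definition above) =====
theorem findSwapValues_spec : Claim_equal_findSwapValues := by
  intro a n b m _
  unfold Spec_findSwapValues findSwapValues findSwapValues_alt
  by_cases hg : n < 1 ∨ m < 1
  · simp [hg]
  · simp only [if_neg hg]
    show (if PySem.Int.mod (a.sum - b.sum) 2 ≠ 0 then -1
          else pvScanA a (PySem.Set.ofList b) (PySem.Int.floordiv (a.sum - b.sum) 2))
       = (if PySem.Int.mod (a.sum - b.sum) 2 ≠ 0 then -1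
          else pvTwoPtr (PySem.List.sorted a (fun x => x) false) (PySem.List.sorted b (fun x => x) false)
                 (PySem.Int.floordiv (a.sum - b.sum) 2))
    split_ifs with hp
    · rfl
    · rw [pvScanA_spec,
          pvTwoPtr_spec _ _ _ (by simpa using PySem.List.sorted_pairwise a (fun x => x))
            (by simpa using PySem.List.sorted_pairwise b (fun x => x))]
      congr 1
      apply propext
      constructor
      · rintro ⟨x, hx, hxb⟩
        exact ⟨x, (PySem.List.mem_sorted _ _ _ _).mpr hx,
               x - PySem.Int.floordiv (a.sum - b.sum) 2,
               (PySem.List.mem_sorted _ _ _ _).mpr ((PySem.Set.mem_ofList _ _).mp hxb), by ring⟩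
      · rintro ⟨x, hx, y, hy, hxy⟩
        refine ⟨x, (PySem.List.mem_sorted _ _ _ _).mp hx, ?_⟩
        have : x - PySem.Int.floordiv (a.sum - b.sum) 2 = y := by omega
        rw [this]
        exact (PySem.Set.mem_ofList _ _).mpr ((PySem.List.mem_sorted _ _ _ _).mp hy)
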